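-- pv_equiv track=rewrite | github.com/MrBrantCode/unitest_baseline | mut_generate/mist_train_cf/cf_65505/solution.py | quad_combinations
-- ===== SOURCE A (Python) =====
-- def quad_combinations(num_sequence):
--     result = []
--     length = len(num_sequence)
--     for i in range(length):
--         for j in range(length):
--             for k in range(length):
--                 result.append(num_sequence[i]*num_sequence[j]*num_sequence[k])
--     return result
-- ===== SOURCE B (Python) =====
-- def quad_combinations(num_sequence):
--     # products of the d-th multiplicative Cartesian power, recursively:
--     # depth 0 is the empty product [1]; each level appends one more factor.
--     def power_products(depth):
--         if depth == 0:
--             return [1]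
--         return [p * x for p in power_products(depth - 1) for x in num_sequence]
--     return power_products(3)
-- ===== Notes on version B (the rewrite author's own statement) =====
-- stated objective: alternative
-- what changed: Replaces the three hardcoded nested index loops by a recursive Cartesian-power construction: power_products(d) is defined by recursion on the depth d starting from the singleton list holding the empty product, each recursive level extending every partial product by one factor; the triple-product list is power_products(3).
import Mathlib
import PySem

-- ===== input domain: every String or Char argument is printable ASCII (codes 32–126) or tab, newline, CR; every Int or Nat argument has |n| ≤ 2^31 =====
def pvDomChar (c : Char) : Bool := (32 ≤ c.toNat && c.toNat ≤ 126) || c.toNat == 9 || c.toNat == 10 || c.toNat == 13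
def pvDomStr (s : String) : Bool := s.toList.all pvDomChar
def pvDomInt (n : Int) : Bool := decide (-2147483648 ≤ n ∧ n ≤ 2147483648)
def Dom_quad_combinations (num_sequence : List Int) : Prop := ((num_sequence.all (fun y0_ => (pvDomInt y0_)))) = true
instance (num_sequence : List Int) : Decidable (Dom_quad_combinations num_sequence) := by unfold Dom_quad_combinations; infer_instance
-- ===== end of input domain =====

-- B computes the list as a recursive Cartesian power: depth-0 is the empty product [1], each recursive level extends every partial product by one factor (alternative decomposition; same values, same order).
-- ===== PORT A =====
def quad_combinations (num_sequence : List Int) : List Int :=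
  let length : Int := num_sequence.length
  (PySem.List.pyRange 0 length 1).foldl (fun result i =>
    (PySem.List.pyRange 0 length 1).foldl (fun result j =>
      (PySem.List.pyRange 0 length 1).foldl (fun result k =>
        result ++ [PySem.List.pyGetD num_sequence i 0 * PySem.List.pyGetD num_sequence j 0 *
                   PySem.List.pyGetD num_sequence k 0]) result) result) []

-- ===== PORT B =====
-- recursive helper power_products(depth) from Source B
def pvPowerProducts (num_sequence : List Int) : Nat → List Int
  | 0 => [1]
  | d + 1 => (pvPowerProducts num_sequence d).flatMap (fun p => num_sequence.map (fun x => p * x))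

def quad_combinations_alt (num_sequence : List Int) : List Int :=
  pvPowerProducts num_sequence 3

-- ===== PRECONDITION & SPEC =====
def Spec_quad_combinations (num_sequence : List Int) (out : List Int) : Prop := out = quad_combinations_alt num_sequence
instance (num_sequence : List Int) (out : List Int) : Decidable (Spec_quad_combinations num_sequence out) := by unfold Spec_quad_combinations; infer_instance

-- ===== CLAIM (what is proved, stated in full; the proofs are below) =====
def Claim_equal_quad_combinations : Prop := ∀ (num_sequence : List Int), Dom_quad_combinations num_sequence → Spec_quad_combinations num_sequence (quad_combinations num_sequence)

-- ===== LEMMAS AND PROOFS =====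

-- innermost k-loop: append c * s[k] for every k
theorem pv_inner (s : List Int) (c : Int) (init : List Int) :
    (PySem.List.pyRange 0 (s.length : Int) 1).foldl
      (fun acc k => acc ++ [c * PySem.List.pyGetD s k 0]) init = init ++ s.map (fun z => c * z) := by
  rw [PySem.List.foldl_pyRange_zero_pyGetD' s 0 (fun acc z => acc ++ [c * z]) init]
  exact PySem.List.foldl_append_singleton_eq_map _ _ _

-- middle j-loop collapsed to a flatMap over the list
theorem pv_mid (s : List Int) (x : Int) (init : List Int) :
    (PySem.List.pyRange 0 (s.length : Int) 1).foldl
      (fun acc j =>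
        (PySem.List.pyRange 0 (s.length : Int) 1).foldl
          (fun acc k => acc ++ [x * PySem.List.pyGetD s j 0 * PySem.List.pyGetD s k 0]) acc) init
      = init ++ s.flatMap (fun y => s.map (fun z => x * y * z)) := by
  have h : (fun (acc : List Int) (j : Int) =>
      (PySem.List.pyRange 0 (s.length : Int) 1).foldl
        (fun acc k => acc ++ [x * PySem.List.pyGetD s j 0 * PySem.List.pyGetD s k 0]) acc)
      = fun acc j => acc ++ s.map (fun z => x * PySem.List.pyGetD s j 0 * z) := by
    funext acc j; exact pv_inner s (x * PySem.List.pyGetD s j 0) acc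
  rw [h, PySem.List.foldl_pyRange_zero_pyGetD' s 0
        (fun acc y => acc ++ s.map (fun z => x * y * z)) init]
  exact PySem.List.foldl_append_eq_flatMap _ _ _

-- B's recursive power unfolds to the triple flatMap with left-associated products
theorem pv_power_three (s : List Int) :
    pvPowerProducts s 3 = s.flatMap (fun x => s.flatMap (fun y => s.map (fun z => x * y * z))) := by
  simp [pvPowerProducts, List.flatMap_assoc, List.map_eq_flatMap, one_mul]

-- ===== VERDICT (by name: the statement is the Claim_ definition above) =====
theorem quad_combinations_spec : Claim_equal_quad_combinations := by
  intro s _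
  unfold Spec_quad_combinations quad_combinations quad_combinations_alt
  simp only
  have h : (fun (acc : List Int) (i : Int) =>
      (PySem.List.pyRange 0 (s.length : Int) 1).foldl
        (fun acc j =>
          (PySem.List.pyRange 0 (s.length : Int) 1).foldl
            (fun acc k => acc ++ [PySem.List.pyGetD s i 0 * PySem.List.pyGetD s j 0 *
              PySem.List.pyGetD s k 0]) acc) acc)
      = fun acc i => acc ++ s.flatMap (fun y => s.map (fun z => PySem.List.pyGetD s i 0 * y * z)) := by
    funext acc i; exact pv_mid s (PySem.List.pyGetD s i 0) acc
  rw [h, PySem.List.foldl_pyRange_zero_pyGetD' s 0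
        (fun acc x => acc ++ s.flatMap (fun y => s.map (fun z => x * y * z))) [],
      PySem.List.foldl_append_eq_flatMap, pv_power_three, List.nil_append]
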